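-- pv_equiv track=rewrite | github.com/qcymkxyc/JZoffer | main/question3/my1.py | find_same2
-- ===== SOURCE A (Python) =====
-- def find_same2(nums):
--     """
--         冒泡排序解决
--     :param nums:
--     :return:
--     """
--     same_list = list()
--     for i in range(len(nums)):
--         for j in range(len(nums) - 1,i,-1):
--             if nums[j] < nums[j - 1]:
--                 t = nums[j]
--                 nums[j] = nums[j - 1]
--                 nums[j - 1] = t
--     for i,v in enumerate(nums):
--         if i == len(nums) - 1:
--             break
--         if v == nums[i + 1]:
--             same_list.append(v)
--     return same_list
-- ===== SOURCE B (Python) =====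
-- def find_same2(nums):
--     nums.sort()
--     res = []
--     rest = nums
--     while rest:
--         v = rest[0]
--         k = 1
--         while k < len(rest) and rest[k] == v:
--             k += 1
--         res += [v] * (k - 1)
--         rest = rest[k:]
--     return res
-- ===== Notes on version B (the rewrite author's own statement) =====
-- stated objective: faster
-- what changed: Replaces the hand-written O(n^2) bubble sort plus adjacent-pair scan with the built-in nums.sort() (same in-place side effect) followed by a run-grouping loop that emits each value (run length - 1) times.
import Mathlib
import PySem

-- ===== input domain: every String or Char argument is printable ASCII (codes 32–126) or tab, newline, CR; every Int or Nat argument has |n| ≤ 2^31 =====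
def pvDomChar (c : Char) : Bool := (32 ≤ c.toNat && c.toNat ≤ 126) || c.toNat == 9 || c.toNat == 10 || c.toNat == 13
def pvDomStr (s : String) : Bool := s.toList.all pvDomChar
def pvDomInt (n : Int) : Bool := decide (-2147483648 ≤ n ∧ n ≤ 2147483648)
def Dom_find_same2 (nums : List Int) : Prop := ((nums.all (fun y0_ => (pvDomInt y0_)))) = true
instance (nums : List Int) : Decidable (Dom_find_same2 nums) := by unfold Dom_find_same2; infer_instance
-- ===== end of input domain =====

-- B replaces A's hand-written bubble sort + adjacent-pair scan with the built-in sort (same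
-- in-place sorting side effect on nums) followed by a run-grouping loop; equivalence proved
-- on the return value (both fully sort nums in place).

-- ===== PORT A =====
-- one body of A's inner loop: compare nums[j] with nums[j-1] and swap in place
def pvSwapStep (a : List Int) (j : Int) : List Int :=
  if PySem.List.pyGetD a j 0 < PySem.List.pyGetD a (j - 1) 0 then
    PySem.List.pySetD (PySem.List.pySetD a j (PySem.List.pyGetD a (j - 1) 0)) (j - 1)
      (PySem.List.pyGetD a j 0)
  else a

-- A's second loop: for i,v in enumerate(nums): if i == len(nums)-1: break; if v == nums[i+1]: append
def pvPhase2 (l : List (Int × Int)) (s : List Int) (acc : List Int) : List Int :=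
  match l with
  | [] => acc
  | (i, v) :: rest =>
    if i = (s.length : Int) - 1 then acc
    else pvPhase2 rest s (if v = PySem.List.pyGetD s (i + 1) 0 then acc ++ [v] else acc)

def find_same2 (nums : List Int) : List Int :=
  let n : Int := nums.length
  let srt :=
    (PySem.List.pyRange 0 n 1).foldl
      (fun a i => (PySem.List.pyRange (n - 1) i (-1)).foldl pvSwapStep a) nums
  pvPhase2 (PySem.List.enumerate srt 0) srt []

-- ===== PORT B =====
-- inner while: k = 1; while k < len(rest) and rest[k] == v: k += 1
def pvCnt (lst : List Int) (v : Int) (k : Int) : Int :=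
  if h : k < (lst.length : Int) ∧ PySem.List.pyGetD lst k 0 = v then pvCnt lst v (k + 1) else k
termination_by (lst.length - k).toNat
decreasing_by omega

-- the inner while never moves k down (cited by pvRunsLoop's termination proof)
theorem pvCnt_ge (lst : List Int) (v k : Int) : k ≤ pvCnt lst v k := by
  unfold pvCnt
  split
  · have := pvCnt_ge lst v (k + 1); omega
  · omega
termination_by (lst.length - k).toNat
decreasing_by omega

-- outer while: emit (run length - 1) copies of the first value, continue on rest[k:]
def pvRunsLoop (rest res : List Int) : List Int :=
  if h : rest = [] then res
  else
    let v := PySem.List.pyGetD rest 0 0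
    let k := pvCnt rest v 1
    pvRunsLoop (PySem.List.slice rest (some k))
      (res ++ List.replicate (k - 1).toNat v)
termination_by rest.length
decreasing_by
  have hk : (1 : Int) ≤ pvCnt rest (PySem.List.pyGetD rest 0 0) 1 := pvCnt_ge rest _ 1
  rw [PySem.List.slice_from rest (a := pvCnt rest (PySem.List.pyGetD rest 0 0) 1) (by omega)]
  have hne : rest.length ≠ 0 := by simpa [List.length_eq_zero_iff] using h
  simp only [List.length_drop]
  omega

def find_same2_alt (nums : List Int) : List Int :=
  pvRunsLoop (PySem.List.sorted nums (fun x => x) false) []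

-- ===== PRECONDITION & SPEC =====
def Spec_find_same2 (nums : List Int) (out : List Int) : Prop := out = find_same2_alt nums
instance (nums : List Int) (out : List Int) : Decidable (Spec_find_same2 nums out) := by unfold Spec_find_same2; infer_instance

-- ===== CLAIM (what is proved, stated in full; the proofs are below) =====
def Claim_equal_find_same2 : Prop := ∀ (nums : List Int), Dom_find_same2 nums → Spec_find_same2 nums (find_same2 nums)

-- ===== LEMMAS AND PROOFS =====

-- the common value both second phases compute: elements equal to their right neighbour
def adjScan : List Int → List Int
  | x :: y :: r => (if x = y then [x] else []) ++ adjScan (y :: r)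
  | _ => []

-- length of the run of v at the front
def eqPrefixLen (v : Int) : List Int → Nat
  | [] => 0
  | x :: r => if x = v then eqPrefixLen v r + 1 else 0

-- structural form of one inner (right-to-left) bubble pass
def bubbleMin : List Int → List Int
  | [] => []
  | x :: xs =>
    match bubbleMin xs with
    | [] => [x]
    | y :: ys => if y < x then y :: x :: ys else x :: y :: ys

theorem bubbleMin_cons_nil (x : Int) (xs : List Int) (h : bubbleMin xs = []) :
    bubbleMin (x :: xs) = [x] := by
  simp only [bubbleMin, h]

theorem bubbleMin_cons_cons (x y : Int) (xs ys : List Int) (h : bubbleMin xs = y :: ys) :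
    bubbleMin (x :: xs) = if y < x then y :: x :: ys else x :: y :: ys := by
  simp only [bubbleMin, h]

theorem length_bubbleMin (l : List Int) : (bubbleMin l).length = l.length := by
  induction l with
  | nil => rfl
  | cons x xs ih =>
    cases h : bubbleMin xs with
    | nil =>
      rw [h] at ih
      rw [bubbleMin_cons_nil x xs h]
      simp only [List.length_nil] at ih
      simp only [List.length_cons, List.length_nil, ← ih]
    | cons y ys =>
      rw [h] at ih
      rw [bubbleMin_cons_cons x y xs ys h]
      simp at ih
      by_cases hlt : y < x <;> simp [hlt] <;> omega

theorem bubbleMin_perm (l : List Int) : (bubbleMin l).Perm l := by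
  induction l with
  | nil => rfl
  | cons x xs ih =>
    cases h : bubbleMin xs with
    | nil =>
      rw [h] at ih
      have hxs : xs = [] := (List.Perm.nil_eq ih).symm
      subst hxs
      rw [bubbleMin_cons_nil x [] h]
    | cons y ys =>
      rw [h] at ih
      rw [bubbleMin_cons_cons x y xs ys h]
      by_cases hlt : y < x
      · rw [if_pos hlt]
        exact (List.Perm.swap x y ys).trans (ih.cons x)
      · rw [if_neg hlt]
        exact ih.cons x

theorem bubbleMin_head_le (l : List Int) (y : Int) (ys : List Int)
    (h : bubbleMin l = y :: ys) : ∀ z ∈ l, y ≤ z := by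
  induction l generalizing y ys with
  | nil => simp [bubbleMin] at h
  | cons x xs ih =>
    cases h' : bubbleMin xs with
    | nil =>
      rw [bubbleMin_cons_nil x xs h'] at h
      have hxs : xs = [] := by
        have := length_bubbleMin xs
        rw [h'] at this
        simpa [List.length_eq_zero_iff] using this.symm
      cases h
      subst hxs
      intro z hz
      simp at hz
      omega
    | cons y' ys' =>
      rw [bubbleMin_cons_cons x y' xs ys' h'] at h
      have hle := ih y' ys' h'
      intro z hz
      rcases List.mem_cons.mp hz with rfl | hz'
      · by_cases hlt : y' < z
        · rw [if_pos hlt] at h; cases h; omega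
        · rw [if_neg hlt] at h; cases h; omega
      · have := hle z hz'
        by_cases hlt : y' < x
        · rw [if_pos hlt] at h; cases h; omega
        · rw [if_neg hlt] at h; cases h; omega

-- structural form of the whole bubble sort
def ssort (l : List Int) : List Int :=
  match h : bubbleMin l with
  | [] => []
  | y :: ys => y :: ssort ys
termination_by l.length
decreasing_by
  have := length_bubbleMin l
  rw [h] at this
  simp at this; omega

theorem ssort_aux (n : Nat) : ∀ l : List Int, l.length ≤ n →
    (ssort l).Perm l ∧ (ssort l).Pairwise (· ≤ ·) := by
  induction n with
  | zero =>
    intro l hl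
    have : l = [] := by simpa [List.length_eq_zero_iff] using Nat.le_zero.mp hl
    subst this
    rw [ssort]
    exact ⟨List.Perm.refl _, List.Pairwise.nil⟩
  | succ m ih =>
    intro l hl
    rw [ssort]
    split
    · rename_i h
      have h0 := length_bubbleMin l
      rw [h] at h0
      have hl0 : l = [] := by simpa [List.length_eq_zero_iff] using h0.symm
      subst hl0
      exact ⟨List.Perm.refl _, List.Pairwise.nil⟩
    · rename_i y ys h
      have hlen : ys.length + 1 = l.length := by
        have := length_bubbleMin l; rw [h] at this; simpa using this
      obtain ⟨hp, hpw⟩ := ih ys (by omega)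
      constructor
      · exact (hp.cons y).trans (h ▸ bubbleMin_perm l)
      · refine List.Pairwise.cons ?_ hpw
        intro z hz
        have hz1 : z ∈ ys := hp.mem_iff.mp hz
        have hz2 : z ∈ l := (bubbleMin_perm l).mem_iff.mp (h ▸ List.mem_cons_of_mem y hz1)
        exact bubbleMin_head_le l y ys h z hz2

theorem ssort_perm (l : List Int) : (ssort l).Perm l :=
  (ssort_aux l.length l (le_refl _)).1

theorem ssort_pairwise (l : List Int) : (ssort l).Pairwise (· ≤ ·) :=
  (ssort_aux l.length l (le_refl _)).2

theorem sorted_eq_ssort (l : List Int) :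
    PySem.List.sorted l (fun x => x) false = ssort l :=
  PySem.List.sorted_id_eq_of_perm_of_pairwise l (ssort l) (ssort_perm l) (ssort_pairwise l)

theorem pvSwapStep_at (pre suf : List Int) (p q : Int) :
    pvSwapStep (pre ++ p :: q :: suf) ((pre.length : Int) + 1)
      = pre ++ (if q < p then q :: p :: suf else p :: q :: suf) := by
  have h1 : PySem.List.pyGetD (pre ++ p :: q :: suf) ((pre.length : Int) + 1) 0 = q := by
    have : ((pre.length : Int) + 1) = ((pre.length + 1 : Nat) : Int) := by push_cast; ring
    rw [this, PySem.List.pyGetD_natCast]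
    simp [List.getD_eq_getElem?_getD, List.getElem?_append_right]
  have h0 : PySem.List.pyGetD (pre ++ p :: q :: suf) ((pre.length : Int) + 1 - 1) 0 = p := by
    have : ((pre.length : Int) + 1 - 1) = ((pre.length : Nat) : Int) := by push_cast; ring
    rw [this, PySem.List.pyGetD_natCast]
    simp [List.getD_eq_getElem?_getD, List.getElem?_append_right]
  unfold pvSwapStep
  rw [h1, h0]
  split
  · next hlt =>
    have e0 : ((pre.length : Int) + 1 - 1) = ((pre.length : Nat) : Int) := by push_cast; ring
    rw [e0, PySem.List.pySetD_natCast]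
    have e1 : ((pre.length : Int) + 1) = ((pre.length + 1 : Nat) : Int) := by push_cast; ring
    rw [e1, PySem.List.pySetD_natCast]
    rw [List.set_append, if_neg (by omega)]
    have d1 : pre.length + 1 - pre.length = 1 := by omega
    rw [d1]
    rw [List.set_append, if_neg (by omega)]
    have d0 : pre.length - pre.length = 0 := by omega
    rw [d0]
    simp [hlt]
  · next hlt => simp [hlt]

theorem pyRange_neg_one_snoc (a b : Int) (h : b < a) :
    PySem.List.pyRange a b (-1) = PySem.List.pyRange a (b + 1) (-1) ++ [b + 1] := by
  rw [PySem.List.pyRange_neg_one_eq_reverse, PySem.List.pyRange_neg_one_eq_reverse,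
    PySem.List.pyRange_one_cons (by omega)]
  simp

theorem inner_eq (a : List Int) (i : Nat) (hi : i ≤ a.length) :
    (PySem.List.pyRange ((a.length : Int) - 1) i (-1)).foldl pvSwapStep a
      = a.take i ++ bubbleMin (a.drop i) := by
  by_cases hcase : a.length ≤ i + 1
  · rw [PySem.List.pyRange_neg_one_eq_nil (by omega)]
    simp only [List.foldl_nil]
    cases hd : a.drop i with
    | nil =>
      have hle : a.length ≤ i := by
        have := List.length_drop (l := a) (i := i); rw [hd] at this; simp at this; omega
      show a = a.take i ++ []
      simp [List.take_of_length_le hle]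
    | cons x t =>
      cases t with
      | nil =>
        show a = a.take i ++ [x]
        rw [← hd, List.take_append_drop]
      | cons w r =>
        exfalso
        have := List.length_drop (l := a) (i := i); rw [hd] at this; simp at this; omega
  · have hlen : i + 2 ≤ a.length := by omega
    have hsnoc : PySem.List.pyRange ((a.length : Int) - 1) i (-1)
        = PySem.List.pyRange ((a.length : Int) - 1) ((i + 1 : Nat) : Int) (-1) ++ [((i : Nat) : Int) + 1] := by
      rw [pyRange_neg_one_snoc _ _ (by push_cast; omega)]
      push_cast; ring_nf
    rw [hsnoc, List.foldl_append]
    rw [inner_eq a (i + 1) (by omega)]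
    simp only [List.foldl_cons, List.foldl_nil]
    have hi' : i < a.length := by omega
    have htake : a.take (i + 1) = a.take i ++ [a[i]] := by
      rw [List.take_succ]; simp [List.getElem?_eq_getElem hi']
    have hdropne : a.drop (i + 1) ≠ [] := by
      simp [← List.length_pos_iff, List.length_drop]; omega
    cases hbm : bubbleMin (a.drop (i + 1)) with
    | nil =>
      exfalso
      have := length_bubbleMin (a.drop (i + 1)); rw [hbm] at this
      simp [List.length_drop] at this; omega
    | cons y ys =>
      have hre : a.take (i + 1) ++ y :: ys = (a.take i) ++ a[i] :: y :: ys := by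
        rw [htake]
        simp only [List.append_assoc, List.singleton_append, List.cons_append, List.nil_append]
      rw [hre]
      have hlentk : ((a.take i).length : Int) = (i : Int) := by
        simp [List.length_take]; omega
      have := pvSwapStep_at (a.take i) ys a[i] y
      rw [hlentk] at this
      rw [this]
      have hdropi : a.drop i = a[i] :: a.drop (i + 1) := List.drop_eq_getElem_cons hi'
      rw [hdropi, bubbleMin_cons_cons _ y _ ys hbm]
termination_by a.length - i

theorem ssort_nil : ssort [] = [] := by
  rw [ssort]
  split
  · rfl
  · next y ys h => simp [bubbleMin] at h

theorem outer_eq (a : List Int) (n : Int) (hn : n = a.length) (i : Nat) (hi : i ≤ a.length) :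
    (PySem.List.pyRange ((i : Nat) : Int) n 1).foldl
        (fun b j => (PySem.List.pyRange (n - 1) j (-1)).foldl pvSwapStep b) a
      = a.take i ++ ssort (a.drop i) := by
  by_cases hcase : a.length ≤ i
  · have hie : i = a.length := by omega
    rw [PySem.List.pyRange_one_eq_nil (by omega)]
    rw [hie]
    simp [ssort_nil]
  · rw [PySem.List.pyRange_one_cons (by omega)]
    simp only [List.foldl_cons]
    have hstep : (PySem.List.pyRange (n - 1) ((i : Nat) : Int) (-1)).foldl pvSwapStep a
        = a.take i ++ bubbleMin (a.drop i) := by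
      rw [hn]; exact inner_eq a i (by omega)
    rw [hstep]
    set b := a.take i ++ bubbleMin (a.drop i) with hb
    have hblen : b.length = a.length := by
      rw [hb]
      simp only [List.length_append, length_bubbleMin, List.length_take, List.length_drop]
      omega
    have ih := outer_eq b n (by rw [hblen]; exact hn) (i + 1) (by rw [hblen]; omega)
    have hcast : ((i : Nat) : Int) + 1 = (((i + 1 : Nat)) : Int) := by push_cast; ring
    rw [hcast, ih]
    have hdropne : a.drop i ≠ [] := by
      simp [← List.length_pos_iff, List.length_drop]; omega
    cases hbm : bubbleMin (a.drop i) with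
    | nil =>
      exfalso
      have := length_bubbleMin (a.drop i); rw [hbm] at this
      simp [List.length_drop] at this; omega
    | cons y ys =>
      have hb2 : b = (a.take i ++ [y]) ++ ys := by rw [hb, hbm]; simp
      have hlen2 : (a.take i ++ [y]).length = i + 1 := by
        simp only [List.length_append, List.length_take, List.length_cons, List.length_nil]
        omega
      have hbtake : b.take (i + 1) = a.take i ++ [y] := by
        rw [hb2, ← hlen2, List.take_left]
      have hbdrop : b.drop (i + 1) = ys := by
        rw [hb2, ← hlen2, List.drop_left]
      rw [hbtake, hbdrop]
      conv_rhs => rw [ssort]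
      split
      · next h' => rw [hbm] at h'; cases h'
      · next y' ys' h' =>
        rw [hbm] at h'
        cases h'
        simp
termination_by a.length - i
decreasing_by rw [hblen]; omega

theorem phase2_eq (s : List Int) : ∀ rest pre acc, s = pre ++ rest →
    pvPhase2 (PySem.List.enumerate rest (pre.length : Int)) s acc = acc ++ adjScan rest := by
  intro rest
  induction rest with
  | nil => intro pre acc hs; simp [PySem.List.enumerate, pvPhase2, adjScan]
  | cons v rest' ih =>
    intro pre acc hs
    rw [PySem.List.enumerate_cons]
    cases rest' with
    | nil =>
      simp only [pvPhase2]
      rw [if_pos (by subst hs; simp only [List.length_append, List.length_cons, List.length_nil]; push_cast; ring)]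
      simp [adjScan]
    | cons w r =>
      simp only [pvPhase2]
      rw [if_neg (by subst hs; simp only [List.length_append, List.length_cons]; push_cast; omega)]
      have hget : PySem.List.pyGetD s ((pre.length : Int) + 1) 0 = w := by
        subst hs
        have : ((pre.length : Int) + 1) = ((pre.length + 1 : Nat) : Int) := by push_cast; ring
        rw [this, PySem.List.pyGetD_natCast]
        simp [List.getD_eq_getElem?_getD, List.getElem?_append_right]
      rw [hget]
      have hcast : ((pre.length : Int) + 1) = (((pre ++ [v]).length : Nat) : Int) := by
        push_cast; simp
      rw [hcast, ih (pre ++ [v]) _ (by subst hs; simp)]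
      have hadj : adjScan (v :: w :: r) = (if v = w then [v] else []) ++ adjScan (w :: r) := by
        simp only [adjScan]
      rw [hadj]
      by_cases hvw : v = w <;> simp [hvw]

theorem pvCnt_eq (v : Int) : ∀ rest pre : List Int,
    pvCnt (pre ++ rest) v (pre.length : Int) = pre.length + eqPrefixLen v rest := by
  intro rest
  induction rest with
  | nil =>
    intro pre
    rw [pvCnt, dif_neg (by simp)]
    simp [eqPrefixLen]
  | cons x r ih =>
    intro pre
    rw [pvCnt]
    have hget : PySem.List.pyGetD (pre ++ x :: r) ((pre.length : Nat) : Int) 0 = x := by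
      rw [PySem.List.pyGetD_natCast]
      simp [List.getD_eq_getElem?_getD, List.getElem?_append_right]
    by_cases hxv : x = v
    · rw [dif_pos ⟨by simp only [List.length_append, List.length_cons]; push_cast; omega,
        by rw [hget]; exact hxv⟩]
      have hcast : ((pre.length : Int) + 1) = (((pre ++ [x]).length : Nat) : Int) := by push_cast; simp
      rw [hcast]
      have := ih (pre ++ [x])
      rw [show (pre ++ [x]) ++ r = pre ++ x :: r by simp] at this
      rw [this]
      simp [eqPrefixLen, hxv]
      push_cast; ring
    · rw [dif_neg (by rw [hget]; tauto)]
      simp [eqPrefixLen, hxv]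

theorem adjScan_run (v : Int) (r : List Int) :
    adjScan (v :: r) = List.replicate (eqPrefixLen v r) v ++ adjScan (r.drop (eqPrefixLen v r)) := by
  induction r with
  | nil => simp [adjScan, eqPrefixLen]
  | cons y t ih =>
    by_cases hyv : y = v
    · subst hyv
      simp only [adjScan, eqPrefixLen, if_pos rfl]
      rw [ih]
      simp [List.replicate_succ]
    · simp only [adjScan, eqPrefixLen, if_neg hyv,
        if_neg (show ¬ v = y from fun h => hyv (Eq.symm h))]
      simp

theorem runsLoop_eq_aux (n : Nat) : ∀ rest res : List Int, rest.length ≤ n →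
    pvRunsLoop rest res = res ++ adjScan rest := by
  induction n with
  | zero =>
    intro rest res hlen
    have : rest = [] := by simpa [List.length_eq_zero_iff] using Nat.le_zero.mp hlen
    subst this
    rw [pvRunsLoop]
    simp [adjScan]
  | succ m ih =>
    intro rest res hlen
    rw [pvRunsLoop]
    split
    · next h => subst h; simp [adjScan]
    · next h =>
      obtain ⟨v, r, rfl⟩ := List.exists_cons_of_ne_nil h
      simp only [PySem.List.pyGetD_zero_cons]
      have hk : pvCnt (v :: r) v 1 = 1 + (eqPrefixLen v r : Int) := by
        have := pvCnt_eq v r [v]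
        simpa using this
      rw [hk]
      have hslice : PySem.List.slice (v :: r) (some (1 + (eqPrefixLen v r : Int)))
          = r.drop (eqPrefixLen v r) := by
        rw [PySem.List.slice_from _ (by omega)]
        have : ((1 : Int) + (eqPrefixLen v r : Int)).toNat = eqPrefixLen v r + 1 := by omega
        rw [this]
        simp
      have hrep : ((1 : Int) + (eqPrefixLen v r : Int) - 1).toNat = eqPrefixLen v r := by omega
      rw [hslice, hrep]
      have hm : (r.drop (eqPrefixLen v r)).length ≤ m := by
        simp only [List.length_drop]
        simp only [List.length_cons] at hlen
        omega
      rw [ih (r.drop (eqPrefixLen v r)) _ hm, adjScan_run]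
      simp

theorem runsLoop_eq (rest res : List Int) : pvRunsLoop rest res = res ++ adjScan rest :=
  runsLoop_eq_aux rest.length rest res (le_refl _)

-- ===== VERDICT (by name: the statement is the Claim_ definition above) =====
theorem find_same2_spec : Claim_equal_find_same2 := by
  intro nums _
  unfold Spec_find_same2 find_same2 find_same2_alt
  have houter := outer_eq nums ((nums.length : Nat) : Int) rfl 0 (Nat.zero_le _)
  simp only [Nat.cast_zero, List.take_zero, List.drop_zero, List.nil_append] at houter
  rw [sorted_eq_ssort, runsLoop_eq]
  show pvPhase2 (PySem.List.enumerate ((PySem.List.pyRange 0 ((nums.length : Nat) : Int) 1).foldl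
      (fun a i => (PySem.List.pyRange (((nums.length : Nat) : Int) - 1) i (-1)).foldl pvSwapStep a) nums) 0)
      ((PySem.List.pyRange 0 ((nums.length : Nat) : Int) 1).foldl
      (fun a i => (PySem.List.pyRange (((nums.length : Nat) : Int) - 1) i (-1)).foldl pvSwapStep a) nums) []
      = [] ++ adjScan (ssort nums)
  rw [houter]
  have := phase2_eq (ssort nums) (ssort nums) [] [] (by simp)
  simpa using this
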